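-- pv_equiv track=rewrite | github.com/veerakarthick235/Voice-to-3D-Face-Animation-Generator | backend/phoneme_mapper.py | _word_to_phonemes
-- ===== SOURCE A (Python) =====
-- from typing import List, Dict, Tuple
--
-- def _word_to_phonemes(word: str) -> List[str]:
--     """Convert word to phoneme sequence (simplified)"""
--     phonemes = []
--     i = 0
--     word = word.upper()
--
--     while i < len(word):
--         # Check for digraphs first
--         if i < len(word) - 1:
--             digraph = word[i:i+2]
--             if digraph == 'TH':
--                 phonemes.append('TH')
--                 i += 2
--                 continue
--             elif digraph == 'SH':
--                 phonemes.append('SH')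
--                 i += 2
--                 continue
--             elif digraph == 'CH':
--                 phonemes.append('CH')
--                 i += 2
--                 continue
--
--         # Single letters
--         char = word[i]
--         if char == 'A':
--             phonemes.append('AE')
--         elif char == 'E':
--             phonemes.append('EH')
--         elif char == 'I':
--             phonemes.append('IH')
--         elif char == 'O':
--             phonemes.append('AO')
--         elif char == 'U':
--             phonemes.append('AH')
--         elif char in 'BPMFVSZTDNLRKGWY':
--             phonemes.append(char)
--
--         i += 1
--
--     return phonemes
-- ===== SOURCE B (Python) =====
-- from typing import List
--
-- _DIGRAPHS = {'TH', 'SH', 'CH'}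
--
-- _M = {'TH': 'TH', 'SH': 'SH', 'CH': 'CH',
--       'A': 'AE', 'E': 'EH', 'I': 'IH', 'O': 'AO', 'U': 'AH'}
-- for _c in 'BPMFVSZTDNLRKGWY':
--     _M[_c] = _c
--
--
-- def _tokenize(w):
--     tokens = []
--     while w:
--         if w[:2] in _DIGRAPHS:
--             tokens.append(w[:2])
--             w = w[2:]
--         else:
--             tokens.append(w[:1])
--             w = w[1:]
--     return tokens
--
--
-- def _word_to_phonemes(word: str) -> List[str]:
--     """Convert word to phoneme sequence (simplified)"""
--     return [_M[t] for t in _tokenize(word.upper()) if t in _M]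
-- ===== Notes on version B (the rewrite author's own statement) =====
-- stated objective: idiomatic
-- what changed: Replaces A's index-walking state machine (while loop with i+=1/i+=2 and an if/elif phoneme chain) by a greedy digraph-first tokenizer followed by a single dict map-filter comprehension.
import Mathlib
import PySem

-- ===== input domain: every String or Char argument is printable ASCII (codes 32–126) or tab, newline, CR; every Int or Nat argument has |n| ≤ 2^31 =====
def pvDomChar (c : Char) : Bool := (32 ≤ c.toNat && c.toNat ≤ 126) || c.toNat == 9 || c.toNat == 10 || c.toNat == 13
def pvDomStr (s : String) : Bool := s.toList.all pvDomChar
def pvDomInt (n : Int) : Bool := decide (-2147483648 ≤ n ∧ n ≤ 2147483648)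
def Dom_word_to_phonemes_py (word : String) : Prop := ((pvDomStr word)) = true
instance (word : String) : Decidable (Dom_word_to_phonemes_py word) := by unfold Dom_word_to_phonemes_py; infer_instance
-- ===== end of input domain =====

-- B replaces A's index-walking state machine by a greedy digraph-first tokenizer
-- followed by a dictionary map-filter pass (objective: idiomatic decomposition, not speed).

-- ===== PORT A =====
-- the single-letter if/elif chain of A's loop body
def pvA_single (c : Char) : List String :=
  if c = 'A' then ["AE"]
  else if c = 'E' then ["EH"]
  else if c = 'I' then ["IH"]
  else if c = 'O' then ["AO"]
  else if c = 'U' then ["AH"]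
  else if ['B','P','M','F','V','S','Z','T','D','N','L','R','K','G','W','Y'].contains c then [String.ofList [c]]
  else []

-- A's while loop, as recursion on the remaining suffix of the uppercased word
def pvA_loop : List Char → List String
  | [] => []
  | [c] => pvA_single c
  | c1 :: c2 :: rest =>
    if c1 = 'T' ∧ c2 = 'H' then "TH" :: pvA_loop rest
    else if c1 = 'S' ∧ c2 = 'H' then "SH" :: pvA_loop rest
    else if c1 = 'C' ∧ c2 = 'H' then "CH" :: pvA_loop rest
    else pvA_single c1 ++ pvA_loop (c2 :: rest)

def word_to_phonemes_py (word : String) : List String :=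
  pvA_loop (PySem.Chars.upper word.toList)

-- ===== PORT B =====
-- Source B's _DIGRAPHS set and _M dict (keys as List Char = Python str; _M built by
-- inserting the consonants over the literal base dict, as Source B's for-loop does)
def pvDigraphs : List (List Char) := [['T','H'], ['S','H'], ['C','H']]

def pvM : PySem.Dict (List Char) String :=
  (['B','P','M','F','V','S','Z','T','D','N','L','R','K','G','W','Y']).foldl
    (fun d c => d.insert [c] (String.ofList [c]))
    (PySem.Dict.ofList [(['T','H'], "TH"), (['S','H'], "SH"), (['C','H'], "CH"),
                        (['A'], "AE"), (['E'], "EH"), (['I'], "IH"), (['O'], "AO"), (['U'], "AH")])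

-- Source B's _tokenize: greedy digraph-first tokenization of the word by slicing
def pvB_tokenize : List Char → List (List Char)
  | [] => []
  | [c] => [[c]]
  | a :: b :: rest =>
    if pvDigraphs.contains [a, b] then [a, b] :: pvB_tokenize rest
    else [a] :: pvB_tokenize (b :: rest)

-- the comprehension [_M[t] for t in _tokenize(word.upper()) if t in _M]
def word_to_phonemes_py_alt (word : String) : List String :=
  (pvB_tokenize (PySem.Chars.upper word.toList)).filterMap (fun t => PySem.Dict.get? pvM t)

-- ===== PRECONDITION & SPEC =====
def Spec_word_to_phonemes_py (word : String) (out : List String) : Prop := out = word_to_phonemes_py_alt word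
instance (word : String) (out : List String) : Decidable (Spec_word_to_phonemes_py word out) := by unfold Spec_word_to_phonemes_py; infer_instance

-- ===== CLAIM (what is proved, stated in full; the proofs are below) =====
def Claim_equal_word_to_phonemes_py : Prop := ∀ (word : String), Dom_word_to_phonemes_py word → Spec_word_to_phonemes_py word (word_to_phonemes_py word)

-- ===== LEMMAS AND PROOFS =====

-- Source B's dict _M, evaluated to its literal item list
theorem pvM_eq : pvM = PySem.Dict.mk
    [(['T','H'], "TH"), (['S','H'], "SH"), (['C','H'], "CH"),
     (['A'], "AE"), (['E'], "EH"), (['I'], "IH"), (['O'], "AO"), (['U'], "AH"),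
     (['B'],"B"),(['P'],"P"),(['M'],"M"),(['F'],"F"),(['V'],"V"),(['S'],"S"),(['Z'],"Z"),(['T'],"T"),
     (['D'],"D"),(['N'],"N"),(['L'],"L"),(['R'],"R"),(['K'],"K"),(['G'],"G"),(['W'],"W"),(['Y'],"Y")] := by
  decide

-- A's single-letter chain emits exactly B's dict lookup on the one-char token
theorem pvSingle_eq (c : Char) : pvA_single c = (PySem.Dict.get? pvM [c]).toList := by
  rw [pvM_eq]
  by_cases h : c ∈ ['A','E','I','O','U','B','P','M','F','V','S','Z','T','D','N','L','R','K','G','W','Y']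
  · fin_cases h <;> decide
  · simp only [List.mem_cons, List.not_mem_nil, not_or, or_false] at h
    obtain ⟨hA,hE,hI,hO,hU,h1,h2,h3,h4,h5,h6,h7,h8,h9,h10,h11,h12,h13,h14,h15,h16⟩ := h
    simp [pvA_single, PySem.Dict.get?_mk_cons, List.cons_beq_cons, beq_iff_eq,
      hA,hE,hI,hO,hU,h1,h2,h3,h4,h5,h6,h7,h8,h9,h10,h11,h12,h13,h14,h15,h16,
      Ne.symm hA,Ne.symm hE,Ne.symm hI,Ne.symm hO,Ne.symm hU,Ne.symm h1,Ne.symm h2,Ne.symm h3,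
      Ne.symm h4,Ne.symm h5,Ne.symm h6,Ne.symm h7,Ne.symm h8,Ne.symm h9,Ne.symm h10,Ne.symm h11,
      Ne.symm h12,Ne.symm h13,Ne.symm h14,Ne.symm h15,Ne.symm h16]
    rfl

-- the main invariant: A's walk equals B's tokenize-then-lookup on every suffix
theorem pvLoop_eq (l : List Char) :
    pvA_loop l = (pvB_tokenize l).filterMap (fun t => PySem.Dict.get? pvM t) := by
  induction l using pvB_tokenize.induct with
  | case1 => rfl
  | case2 c =>
    rw [show pvB_tokenize [c] = [[c]] from rfl]
    rw [show pvA_loop [c] = pvA_single c from rfl, pvSingle_eq]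
    cases h : PySem.Dict.get? pvM [c] <;> simp [h]
  | case3 a b rest h ih =>
    have h' : [a, b] = ['T','H'] ∨ [a, b] = ['S','H'] ∨ [a, b] = ['C','H'] := by
      simpa [pvDigraphs] using h
    rw [pvB_tokenize, if_pos h]
    rcases h' with h' | h' | h' <;>
      (simp only [List.cons.injEq, and_true] at h'; obtain ⟨rfl, rfl⟩ := h') <;>
      simp [pvA_loop, ih, pvM_eq, PySem.Dict.get?_mk_cons]
  | case4 a b rest h ih =>
    have h' : ¬(a = 'T' ∧ b = 'H') ∧ ¬(a = 'S' ∧ b = 'H') ∧ ¬(a = 'C' ∧ b = 'H') := by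
      constructor
      · rintro ⟨rfl, rfl⟩; simp [pvDigraphs] at h
      constructor
      · rintro ⟨rfl, rfl⟩; simp [pvDigraphs] at h
      · rintro ⟨rfl, rfl⟩; simp [pvDigraphs] at h
    rw [pvB_tokenize, if_neg (by simpa using h)]
    rw [pvA_loop, if_neg h'.1, if_neg h'.2.1, if_neg h'.2.2, pvSingle_eq]
    cases hc : PySem.Dict.get? pvM [a] <;> simp [hc, ih]

-- ===== VERDICT (by name: the statement is the Claim_ definition above) =====
theorem word_to_phonemes_py_spec : Claim_equal_word_to_phonemes_py := by
  intro word _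
  unfold Spec_word_to_phonemes_py word_to_phonemes_py word_to_phonemes_py_alt
  exact pvLoop_eq _
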